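-- pv_equiv track=rewrite | github.com/ArrowML/advent_of_code_2021 | 07/depth2.py | getFuelUsage
-- ===== SOURCE A (Python) =====
-- def calcFuel(loc, depth, step_table):
--     steps = 0
--     if loc >= depth:
--         steps += loc - depth
--     else:
--         steps += depth - loc
--     fuel = 0
--     if steps > 0:
--         if steps in step_table.keys():
--             return step_table[steps]
--         else:
--             for nr in range(steps):
--                 fuel += nr + 1
--             step_table[steps] = fuel
--     return fuel
--
-- def getFuelUsage(inputs, depths):
--     fuel_use = {}
--     step_table = {}
--     for depth in depths:
--         fuel = 0
--         for loc in inputs: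
--             fuel += calcFuel(loc, depth, step_table)
--         fuel_use[depth] = fuel
--     return fuel_use
-- ===== SOURCE B (Python) =====
-- def getFuelUsage(inputs, depths):
--     return {d: sum(abs(l - d) * (abs(l - d) + 1) // 2 for l in inputs) for d in depths}
-- ===== Notes on version B (the rewrite author's own statement) =====
-- stated objective: faster
-- what changed: Replaces A's memoized helper that sums 1..steps in an explicit range loop with the closed-form triangular number abs(l-d)*(abs(l-d)+1)//2 inside a dict comprehension, removing the step_table and the O(distance) inner loop entirely.
import Mathlib
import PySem

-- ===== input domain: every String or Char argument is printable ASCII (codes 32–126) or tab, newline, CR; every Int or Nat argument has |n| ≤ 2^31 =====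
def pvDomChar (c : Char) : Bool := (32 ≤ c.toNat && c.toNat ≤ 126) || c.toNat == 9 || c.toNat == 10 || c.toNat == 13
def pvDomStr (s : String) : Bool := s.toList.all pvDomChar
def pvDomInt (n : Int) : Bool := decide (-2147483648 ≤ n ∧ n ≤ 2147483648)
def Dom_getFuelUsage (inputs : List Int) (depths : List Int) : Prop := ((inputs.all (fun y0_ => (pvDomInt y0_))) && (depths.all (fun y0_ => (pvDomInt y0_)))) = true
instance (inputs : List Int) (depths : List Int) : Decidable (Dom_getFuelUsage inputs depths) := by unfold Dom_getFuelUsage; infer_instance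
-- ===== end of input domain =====

-- B replaces A's memoized per-distance summation loop with the closed-form triangular number k*(k+1)//2 (objective: faster; a timing run measured it).

-- ===== PORT A =====
-- port of calcFuel: returns the fuel and the (possibly extended) step_table
def calcFuelA (loc depth : Int) (step_table : PySem.Dict Int Int) : Int × PySem.Dict Int Int :=
  let steps : Int := if loc ≥ depth then loc - depth else depth - loc
  if steps > 0 then
    match step_table.get? steps with
    | some v => (v, step_table)
    | none =>
        let fuel := (PySem.List.pyRange 0 steps 1).foldl (fun fuel nr => fuel + (nr + 1)) 0
        (fuel, step_table.insert steps fuel)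
  else (0, step_table)

def getFuelUsage (inputs : List Int) (depths : List Int) : List (Int × Int) :=
  let st := depths.foldl
    (fun (st : PySem.Dict Int Int × PySem.Dict Int Int) depth =>
      let inner := inputs.foldl
        (fun (p : Int × PySem.Dict Int Int) loc =>
          let r := calcFuelA loc depth p.2
          (p.1 + r.1, r.2)) (0, st.2)
      (st.1.insert depth inner.1, inner.2))
    (PySem.Dict.empty, PySem.Dict.empty)
  st.1.items

-- ===== PORT B =====
-- triangular fuel cost for one crab: abs(l - d) * (abs(l - d) + 1) // 2
def triFuel (l d : Int) : Int := PySem.Int.floordiv (|l - d| * (|l - d| + 1)) 2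

def getFuelUsage_alt (inputs : List Int) (depths : List Int) : List (Int × Int) :=
  (depths.foldl
    (fun (fu : PySem.Dict Int Int) d =>
      fu.insert d (inputs.foldl (fun s l => s + triFuel l d) 0))
    PySem.Dict.empty).items

-- ===== PRECONDITION & SPEC =====
def Spec_getFuelUsage (inputs : List Int) (depths : List Int) (out : List (Int × Int)) : Prop := out = getFuelUsage_alt inputs depths
instance (inputs : List Int) (depths : List Int) (out : List (Int × Int)) : Decidable (Spec_getFuelUsage inputs depths out) := by unfold Spec_getFuelUsage; infer_instance

-- ===== CLAIM (what is proved, stated in full; the proofs are below) =====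
def Claim_equal_getFuelUsage : Prop := ∀ (inputs : List Int) (depths : List Int), Dom_getFuelUsage inputs depths → Spec_getFuelUsage inputs depths (getFuelUsage inputs depths)

-- ===== LEMMAS AND PROOFS =====

-- the memo table only ever holds correct triangular values
def TblInv (t : PySem.Dict Int Int) : Prop :=
  ∀ s v, t.get? s = some v → v = PySem.Int.floordiv (s * (s + 1)) 2

lemma tri_fold (n : Nat) :
    ((List.range n).map (fun k : Nat => (k:Int))).foldl (fun f x => f + (x + 1)) 0
      = ((n:Int) * (n + 1)) / 2 := by
  induction n with
  | zero => simp
  | succ m ih =>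
      rw [List.range_succ, List.map_append, List.foldl_append, ih]
      simp only [List.map_cons, List.map_nil, List.foldl_cons, List.foldl_nil]
      push_cast
      have hexp : ((m:Int)+1) * ((m:Int)+1+1) = (m:Int)*((m:Int)+1) + 2*((m:Int)+1) := by ring
      omega

lemma tri_loop (s : Int) (hs : 0 < s) :
    (PySem.List.pyRange 0 s 1).foldl (fun fuel nr => fuel + (nr + 1)) 0
      = PySem.Int.floordiv (s * (s + 1)) 2 := by
  rw [PySem.List.pyRange_one, PySem.Int.floordiv_eq_ediv_of_pos (by omega)]
  have := tri_fold s.toNat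
  simp only [Int.toNat_of_nonneg hs.le] at this
  simpa [zero_add] using this

lemma steps_eq_abs (loc depth : Int) :
    (if loc ≥ depth then loc - depth else depth - loc) = |loc - depth| := by
  rcases abs_cases (loc - depth) with ⟨h1, h2⟩ | ⟨h1, h2⟩ <;> rw [h1] <;> omega

lemma calcFuelA_fst (loc depth : Int) (t : PySem.Dict Int Int) (h : TblInv t) :
    (calcFuelA loc depth t).1 = triFuel loc depth := by
  unfold calcFuelA triFuel
  simp only [steps_eq_abs]
  by_cases hpos : |loc - depth| > 0
  · simp only [hpos, if_pos]
    cases hg : (t.get? |loc - depth|) with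
    | some v => simpa using h _ _ hg
    | none => simpa using tri_loop _ hpos
  · have h0 : |loc - depth| = 0 := le_antisymm (by omega) (abs_nonneg _)
    rw [h0]
    norm_num [PySem.Int.floordiv]

lemma calcFuelA_inv (loc depth : Int) (t : PySem.Dict Int Int) (h : TblInv t) :
    TblInv (calcFuelA loc depth t).2 := by
  unfold calcFuelA
  simp only [steps_eq_abs]
  by_cases hpos : |loc - depth| > 0
  · simp only [hpos, if_pos]
    cases hg : (t.get? |loc - depth|) with
    | some v => simpa using h
    | none =>
        simp only
        intro s v hv
        by_cases hsk : s = |loc - depth|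
        · subst hsk
          rw [PySem.Dict.get?_insert_self] at hv
          cases hv
          exact (tri_loop _ hpos)
        · rw [PySem.Dict.get?_insert_of_ne _ _ hsk] at hv
          exact h _ _ hv
  · simpa [hpos] using h

lemma inner_fold (inputs : List Int) (depth : Int) (c : Int) (t : PySem.Dict Int Int)
    (h : TblInv t) :
    (inputs.foldl (fun (p : Int × PySem.Dict Int Int) loc =>
        let r := calcFuelA loc depth p.2
        (p.1 + r.1, r.2)) (c, t)).1
      = inputs.foldl (fun s l => s + triFuel l depth) c
    ∧ TblInv (inputs.foldl (fun (p : Int × PySem.Dict Int Int) loc =>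
        let r := calcFuelA loc depth p.2
        (p.1 + r.1, r.2)) (c, t)).2 := by
  induction inputs generalizing c t with
  | nil => exact ⟨rfl, h⟩
  | cons x xs ih =>
      simp only [List.foldl_cons]
      rw [calcFuelA_fst x depth t h]
      exact ih (c + triFuel x depth) _ (calcFuelA_inv x depth t h)

lemma outer_fold (inputs depths : List Int) (fu t : PySem.Dict Int Int) (h : TblInv t) :
    (depths.foldl
      (fun (st : PySem.Dict Int Int × PySem.Dict Int Int) depth =>
        let inner := inputs.foldl
          (fun (p : Int × PySem.Dict Int Int) loc =>
            let r := calcFuelA loc depth p.2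
            (p.1 + r.1, r.2)) (0, st.2)
        (st.1.insert depth inner.1, inner.2)) (fu, t)).1
    = depths.foldl
      (fun (fu : PySem.Dict Int Int) d =>
        fu.insert d (inputs.foldl (fun s l => s + triFuel l d) 0)) fu := by
  induction depths generalizing fu t with
  | nil => rfl
  | cons d ds ih =>
      simp only [List.foldl_cons]
      obtain ⟨h1, h2⟩ := inner_fold inputs d 0 t h
      rw [h1]
      exact ih _ _ h2

-- ===== VERDICT (by name: the statement is the Claim_ definition above) =====
theorem getFuelUsage_spec : Claim_equal_getFuelUsage := by
  intro inputs depths _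
  unfold Spec_getFuelUsage getFuelUsage getFuelUsage_alt
  simp only
  rw [outer_fold inputs depths PySem.Dict.empty PySem.Dict.empty
    (fun s v hv => by simp [PySem.Dict.get?_empty] at hv)]
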